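-- pv_equiv track=rewrite | github.com/scottransom/presto | python/presto/psr_utils.py | choose_N
-- ===== SOURCE A (Python) =====
-- from builtins import str
--
-- def is_power_of_10(n):
--     """
--     is_power_of_10(n):
--         If n is a power of 10, return True.
--     """
--     N = int(n)
--     while (N > 9 and N % 10 == 0):
--         N //= 10
--     return N == 1
--
-- def choose_N(orig_N):
--     """
--     choose_N(orig_N):
--         Choose a time series length that is larger than
--             the input value but that is highly factorable.
--             Note that the returned value must be divisible
--             by at least the maximum downsample factor * 2.
--             Currently, this is 8 * 2 = 16.
--     """
--     # A list of 4-dgit numbers that are highly factorable by small primes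
--     goodfactors = [1000, 1008, 1024, 1056, 1120, 1152, 1200, 1232, 1280,
--                    1296, 1344, 1408, 1440, 1536, 1568, 1584, 1600, 1680,
--                    1728, 1760, 1792, 1920, 1936, 2000, 2016, 2048, 2112,
--                    2160, 2240, 2304, 2352, 2400, 2464, 2560, 2592, 2640,
--                    2688, 2800, 2816, 2880, 3024, 3072, 3136, 3168, 3200,
--                    3360, 3456, 3520, 3584, 3600, 3696, 3840, 3872, 3888,
--                    3920, 4000, 4032, 4096, 4224, 4320, 4400, 4480, 4608,
--                    4704, 4752, 4800, 4928, 5040, 5120, 5184, 5280, 5376,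
--                    5488, 5600, 5632, 5760, 5808, 6000, 6048, 6144, 6160,
--                    6272, 6336, 6400, 6480, 6720, 6912, 7040, 7056, 7168,
--                    7200, 7392, 7680, 7744, 7776, 7840, 7920, 8000, 8064,
--                    8192, 8400, 8448, 8624, 8640, 8800, 8960, 9072, 9216,
--                    9408, 9504, 9600, 9680, 9856, 10000]
--     if orig_N < 10000:
--         return 0
--     # Get the number represented by the first 4 digits of orig_N
--     first4 = int(str(orig_N)[:4])
--     # Now get the number that is just bigger than orig_N
--     # that has its first 4 digits equal to "factor"
--     for factor in goodfactors:
--         if (factor == first4 and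
--             orig_N % factor == 0 and
--             is_power_of_10(orig_N//factor)): break
--         if factor > first4: break
--     new_N = factor
--     while new_N < orig_N:
--         new_N *= 10
--     if new_N == orig_N:
--         return orig_N
--     # Finally, compare new_N to the closest power_of_two
--     # greater than orig_N.  Take the closest.
--     two_N = 2
--     while two_N < orig_N:
--         two_N *= 2
--     return min(two_N, new_N)
-- ===== SOURCE B (Python) =====
-- # B: replaces A's linear break-scan with a hand-rolled bisect_right binary search,
-- # the is_power_of_10 check with a closed-form "orig_N == first4 * p" test, and the
-- # two while-loops (x10 scaling, x2 power search) with closed forms from the digit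
-- # count and bit_length.
--
-- _GOODFACTORS = [1000, 1008, 1024, 1056, 1120, 1152, 1200, 1232, 1280,
--                 1296, 1344, 1408, 1440, 1536, 1568, 1584, 1600, 1680,
--                 1728, 1760, 1792, 1920, 1936, 2000, 2016, 2048, 2112,
--                 2160, 2240, 2304, 2352, 2400, 2464, 2560, 2592, 2640,
--                 2688, 2800, 2816, 2880, 3024, 3072, 3136, 3168, 3200,
--                 3360, 3456, 3520, 3584, 3600, 3696, 3840, 3872, 3888,
--                 3920, 4000, 4032, 4096, 4224, 4320, 4400, 4480, 4608,
--                 4704, 4752, 4800, 4928, 5040, 5120, 5184, 5280, 5376,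
--                 5488, 5600, 5632, 5760, 5808, 6000, 6048, 6144, 6160,
--                 6272, 6336, 6400, 6480, 6720, 6912, 7040, 7056, 7168,
--                 7200, 7392, 7680, 7744, 7776, 7840, 7920, 8000, 8064,
--                 8192, 8400, 8448, 8624, 8640, 8800, 8960, 9072, 9216,
--                 9408, 9504, 9600, 9680, 9856, 10000]
--
--
-- def _bisect_right(a, x):
--     """Index of the first element of sorted list a strictly greater than x."""
--     lo, hi = 0, len(a)
--     while lo < hi:
--         mid = (lo + hi) // 2
--         if a[mid] <= x:
--             lo = mid + 1
--         else:
--             hi = mid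
--     return lo
--
--
-- def choose_N(orig_N):
--     if orig_N < 10000:
--         return 0
--     s = str(orig_N)
--     first4 = int(s[:4])
--     p = 10 ** (len(s) - 4)
--     i = _bisect_right(_GOODFACTORS, first4)
--     # orig_N is exactly a good 4-digit factor times a power of ten: keep it.
--     if orig_N == first4 * p and i > 0 and _GOODFACTORS[i - 1] == first4:
--         return orig_N
--     new_N = _GOODFACTORS[i] * p
--     two_N = 1 << (orig_N - 1).bit_length()
--     return min(two_N, new_N)
-- ===== Notes on version B (the rewrite author's own statement) =====
-- stated objective: alternative
-- what changed: B locates the factor by a hand-rolled bisect_right binary search over the sorted table instead of A's linear break-scan, tests the exact case with a closed-form product comparison instead of A's repeated-division is_power_of_10 loop, and obtains the power-of-ten scale and the next power of two in closed form from the decimal length and bit_length instead of A's two multiply loops.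
import Mathlib
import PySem

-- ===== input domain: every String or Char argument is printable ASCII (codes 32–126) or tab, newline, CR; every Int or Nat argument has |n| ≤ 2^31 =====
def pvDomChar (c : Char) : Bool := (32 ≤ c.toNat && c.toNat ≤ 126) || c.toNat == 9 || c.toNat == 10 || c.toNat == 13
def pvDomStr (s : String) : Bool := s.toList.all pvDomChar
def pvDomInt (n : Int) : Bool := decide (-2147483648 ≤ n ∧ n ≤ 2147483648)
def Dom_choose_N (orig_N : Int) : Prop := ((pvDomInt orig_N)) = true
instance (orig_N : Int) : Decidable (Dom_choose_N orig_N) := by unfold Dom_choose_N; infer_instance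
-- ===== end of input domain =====

-- B replaces A's linear break-scan over the factor list by a binary search, the
-- is_power_of_10 divisibility probe by a closed-form "orig_N == first4 * p" test, and
-- A's ×10 / ×2 while-loops by closed forms (power of ten from the digit count,
-- power of two from bit_length); equivalence is proved for the return value.

-- the shared table of highly factorable 4-digit lengths (a literal in both programs)
def goodfactors : List Int :=
  [1000, 1008, 1024, 1056, 1120, 1152, 1200, 1232, 1280,
   1296, 1344, 1408, 1440, 1536, 1568, 1584, 1600, 1680,
   1728, 1760, 1792, 1920, 1936, 2000, 2016, 2048, 2112,
   2160, 2240, 2304, 2352, 2400, 2464, 2560, 2592, 2640,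
   2688, 2800, 2816, 2880, 3024, 3072, 3136, 3168, 3200,
   3360, 3456, 3520, 3584, 3600, 3696, 3840, 3872, 3888,
   3920, 4000, 4032, 4096, 4224, 4320, 4400, 4480, 4608,
   4704, 4752, 4800, 4928, 5040, 5120, 5184, 5280, 5376,
   5488, 5600, 5632, 5760, 5808, 6000, 6048, 6144, 6160,
   6272, 6336, 6400, 6480, 6720, 6912, 7040, 7056, 7168,
   7200, 7392, 7680, 7744, 7776, 7840, 7920, 8000, 8064,
   8192, 8400, 8448, 8624, 8640, 8800, 8960, 9072, 9216,
   9408, 9504, 9600, 9680, 9856, 10000]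

-- ===== PORT A =====

-- while (N > 9 and N % 10 == 0): N //= 10
def ipow10Loop (N : Int) : Int :=
  if h : 9 < N ∧ PySem.Int.mod N 10 = 0 then ipow10Loop (PySem.Int.floordiv N 10) else N
termination_by N.toNat
decreasing_by
  rw [PySem.Int.floordiv_eq_ediv_of_pos (by norm_num : (0:Int) < 10)]
  omega

def is_power_of_10 (n : Int) : Bool := ipow10Loop n == 1

-- 'for factor in goodfactors: …break…'; cur is the loop variable `factor`
def factorLoop (orig_N first4 : Int) : List Int → Int → Int
  | [], cur => cur
  | x :: xs, _cur =>
    if x == first4 && (PySem.Int.mod orig_N x == 0) &&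
        is_power_of_10 (PySem.Int.floordiv orig_N x) then x
    else if first4 < x then x
    else factorLoop orig_N first4 xs x

-- 'while cur < t: cur *= mult' (fuel makes the loop total; it is called with ample fuel)
def growLoop (mult : Int) : Nat → Int → Int → Int
  | 0, _t, cur => cur
  | fuel+1, t, cur => if cur < t then growLoop mult fuel t (cur * mult) else cur

def choose_N (orig_N : Int) : Int :=
  if orig_N < 10000 then 0
  else
    -- int() cannot raise here: the slice is a nonempty run of digits
    let first4 := (PySem.Int.ofStr? (PySem.Str.slice (PySem.Int.toStr orig_N) none (some 4))).getD 0
    let factor := factorLoop orig_N first4 goodfactors 0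
    let new_N := growLoop 10 orig_N.toNat orig_N factor
    if new_N = orig_N then orig_N
    else
      let two_N := growLoop 2 orig_N.toNat orig_N 2
      min two_N new_N

-- ===== PORT B =====

-- while lo < hi: mid = (lo+hi)//2; if a[mid] <= x: lo = mid+1 else: hi = mid
def bisectLoopB (a : List Int) (x lo hi : Int) : Int :=
  if h : lo < hi then
    if PySem.List.pyGetD a (PySem.Int.floordiv (lo + hi) 2) 0 ≤ x then
      bisectLoopB a x (PySem.Int.floordiv (lo + hi) 2 + 1) hi
    else
      bisectLoopB a x lo (PySem.Int.floordiv (lo + hi) 2)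
  else lo
termination_by (hi - lo).toNat
decreasing_by
  all_goals
    rw [PySem.Int.floordiv_eq_ediv_of_pos (by norm_num : (0:Int) < 2)]
    omega

def bisect_right (a : List Int) (x : Int) : Int := bisectLoopB a x 0 (a.length : Int)

def choose_N_alt (orig_N : Int) : Int :=
  if orig_N < 10000 then 0
  else
    let s := PySem.Int.toStr orig_N
    let first4 := (PySem.Int.ofStr? (PySem.Str.slice s none (some 4))).getD 0
    -- 10 ** (len(s) - 4); the exponent is ≥ 1 for every orig_N ≥ 10000
    let p : Int := 10 ^ (PySem.Str.len s - 4).toNat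
    let i := bisect_right goodfactors first4
    if orig_N = first4 * p ∧ 0 < i ∧ PySem.List.pyGetD goodfactors (i - 1) 0 = first4 then
      orig_N
    else
      let new_N := PySem.List.pyGetD goodfactors i 0 * p
      let two_N := (1 : Int) <<< PySem.Int.bitLength (orig_N - 1)
      min two_N new_N

-- ===== PRECONDITION & SPEC =====
def Spec_choose_N (orig_N : Int) (out : Int) : Prop := out = choose_N_alt orig_N
instance (orig_N : Int) (out : Int) : Decidable (Spec_choose_N orig_N out) := by unfold Spec_choose_N; infer_instance

-- ===== CLAIM (what is proved, stated in full; the proofs are below) =====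
def Claim_equal_choose_N : Prop := ∀ (orig_N : Int), Dom_choose_N orig_N → Spec_choose_N orig_N (choose_N orig_N)

-- ===== LEMMAS AND PROOFS =====

theorem tdc_append (f : Nat) : ∀ (n : Nat) (l : List Char),
    Nat.toDigitsCore 10 f n l = Nat.toDigitsCore 10 f n [] ++ l := by
  induction f with
  | zero => intro n l; simp [Nat.toDigitsCore]
  | succ f ih =>
    intro n l
    simp only [Nat.toDigitsCore]
    by_cases h : n / 10 = 0
    · simp [h]
    · simp only [h, if_false]
      rw [ih (n / 10) [Nat.digitChar (n % 10)], ih (n / 10) (Nat.digitChar (n % 10) :: l)]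
      simp

theorem tdc_fuel (f : Nat) : ∀ (f' n : Nat), n < f → n < f' →
    Nat.toDigitsCore 10 f n [] = Nat.toDigitsCore 10 f' n [] := by
  induction f with
  | zero => intro f' n h; omega
  | succ f ih =>
    intro f' n h h'
    cases f' with
    | zero => omega
    | succ f' =>
      simp only [Nat.toDigitsCore]
      by_cases hz : n / 10 = 0
      · simp [hz]
      · simp only [hz, if_false]
        rw [tdc_append f, tdc_append f']
        rw [ih f' (n / 10) (by omega) (by omega)]

theorem toDigits_small (m : Nat) (h : m < 10) : Nat.toDigits 10 m = [Nat.digitChar m] := by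
  simp only [Nat.toDigits, Nat.toDigitsCore]
  rw [Nat.div_eq_of_lt h, Nat.mod_eq_of_lt h]
  simp

theorem toDigits_step (m : Nat) (h : 10 ≤ m) :
    Nat.toDigits 10 m = Nat.toDigits 10 (m / 10) ++ [Nat.digitChar (m % 10)] := by
  simp only [Nat.toDigits]
  conv_lhs => rw [show m + 1 = (m) + 1 from rfl]
  simp only [Nat.toDigitsCore]
  have hz : ¬ m / 10 = 0 := by omega
  simp only [hz, if_false]
  rw [tdc_append m]
  congr 1
  exact tdc_fuel m (m / 10 + 1) (m / 10) (by omega) (by omega)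

theorem toDigits_brackets : ∀ (m : Nat), 1 ≤ m →
    1 ≤ (Nat.toDigits 10 m).length ∧
    10 ^ ((Nat.toDigits 10 m).length - 1) ≤ m ∧ m < 10 ^ (Nat.toDigits 10 m).length := by
  intro m
  induction m using Nat.strong_induction_on with
  | _ m ih =>
    intro hm
    by_cases h : m < 10
    · rw [toDigits_small m h]; simpa using ⟨hm, h⟩
    · push_neg at h
      rw [toDigits_step m h]
      have h1 : 1 ≤ m / 10 := by omega
      obtain ⟨hL, hlo, hhi⟩ := ih (m / 10) (by omega) h1
      set L := (Nat.toDigits 10 (m / 10)).length with hLdef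
      simp only [List.length_append, List.length_cons, List.length_nil]
      refine ⟨by omega, ?_, ?_⟩
      · have : 10 ^ L = 10 * 10 ^ (L - 1) := by
          rw [← pow_succ']; congr 1; omega
        calc 10 ^ (L + 1 - 1) = 10 ^ L := by norm_num
          _ = 10 * 10 ^ (L - 1) := this
          _ ≤ 10 * (m / 10) := by omega
          _ ≤ m := Nat.mul_div_le m 10
      · have : m < 10 * (m / 10) + 10 := by omega
        calc m < 10 * (m / 10 + 1) := by omega
          _ ≤ 10 * 10 ^ L := by omega
          _ = 10 ^ (L + 1) := by rw [pow_succ]; ring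

theorem toDigits_split : ∀ (j m : Nat), 10 ^ j ≤ m →
    ∃ t, Nat.toDigits 10 m = Nat.toDigits 10 (m / 10 ^ j) ++ t ∧ t.length = j := by
  intro j
  induction j with
  | zero => intro m _; exact ⟨[], by simp⟩
  | succ j ih =>
    intro m hm
    have h10 : 10 ≤ m := by
      have : (10:Nat) ^ 1 ≤ 10 ^ (j + 1) := Nat.pow_le_pow_right (by norm_num) (by omega)
      simpa using le_trans this hm
    obtain ⟨t, ht, hlen⟩ := ih (m / 10) (by
      have := Nat.div_le_div_right (c := 10) hm
      have h2 : 10 ^ (j+1) / 10 = 10 ^ j := by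
        rw [pow_succ, Nat.mul_div_cancel]; norm_num
      omega)
    refine ⟨t ++ [Nat.digitChar (m % 10)], ?_, by simp [hlen]⟩
    rw [toDigits_step m h10, ht]
    rw [Nat.div_div_eq_div_mul, ← pow_succ']
    simp

set_option maxHeartbeats 8000000 in
set_option maxRecDepth 1000000 in
theorem parse_all : (List.range' 1000 9000).all
    (fun k => PySem.Int.ofChars? (Nat.toDigits 10 k) == some (k : Int)) = true := by decide

theorem parse_range (q : Nat) (h1 : 1000 ≤ q) (h2 : q < 10000) :
    PySem.Int.ofChars? (Nat.toDigits 10 q) = some (q : Int) := by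
  have hm : q ∈ List.range' 1000 9000 := by rw [List.mem_range'_1]; omega
  have := List.all_eq_true.mp parse_all q hm
  simpa using this

theorem digits_pkg (n : Int) (hn : 10000 ≤ n) :
    ∃ (q j : Nat),
      1000 ≤ q ∧ q < 10000 ∧ 1 ≤ j ∧
      (PySem.Int.toChars n).length = j + 4 ∧
      List.take 4 (PySem.Int.toChars n) = Nat.toDigits 10 q ∧
      (q : Int) * 10 ^ j ≤ n ∧ n < ((q : Int) + 1) * 10 ^ j := by
  obtain ⟨m, hnm⟩ : ∃ mm : Nat, n = (mm : Int) := ⟨n.toNat, by omega⟩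
  have hm : 10000 ≤ m := by omega
  have hchars : PySem.Int.toChars n = Nat.toDigits 10 m := by
    rw [hnm]
    simp [PySem.Int.toChars, show ¬ (m:Int) < 0 by omega]
  obtain ⟨hL1, hlo, hhi⟩ := toDigits_brackets m (by omega)
  set L := (Nat.toDigits 10 m).length with hLdef
  have hL5 : 5 ≤ L := by
    by_contra hc
    have : L ≤ 4 := by omega
    have : (10:Nat) ^ L ≤ 10 ^ 4 := Nat.pow_le_pow_right (by norm_num) this
    norm_num at this
    omega
  set j := L - 4 with hjdef
  have hjle : 10 ^ j ≤ m := by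
    calc (10:Nat) ^ j ≤ 10 ^ (L - 1) := Nat.pow_le_pow_right (by norm_num) (by omega)
      _ ≤ m := hlo
  obtain ⟨t, ht, htlen⟩ := toDigits_split j m hjle
  set q := m / 10 ^ j with hqdef
  have hq1000 : 1000 ≤ q := by
    rw [hqdef]
    rw [Nat.le_div_iff_mul_le (by positivity)]
    calc 1000 * 10 ^ j = 10 ^ 3 * 10 ^ j := by norm_num
      _ = 10 ^ (3 + j) := by rw [pow_add]
      _ = 10 ^ (L - 1) := by congr 1; omega
      _ ≤ m := hlo
  have hq1 : 1 ≤ q := by omega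
  have hlen4 : (Nat.toDigits 10 q).length = 4 := by
    have := congrArg List.length ht
    simp only [List.length_append, htlen] at this
    omega
  have hq10000 : q < 10000 := by
    obtain ⟨_, _, h3⟩ := toDigits_brackets q hq1
    rw [hlen4] at h3
    norm_num at h3
    exact h3
  have htake : List.take 4 (PySem.Int.toChars n) = Nat.toDigits 10 q := by
    rw [hchars, ht]
    exact List.take_left' hlen4
  have hdm := Nat.div_add_mod m (10 ^ j)
  rw [← hqdef] at hdm
  have hmod := Nat.mod_lt m (y := 10 ^ j) (by positivity)
  have e1 : (q + 1) * 10 ^ j = 10 ^ j * q + 10 ^ j := by ring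
  have hlow : q * 10 ^ j ≤ m := by rw [mul_comm]; omega
  have hup : m < (q + 1) * 10 ^ j := by omega
  refine ⟨q, j, hq1000, hq10000, by omega, ?_, ?_, ?_, ?_⟩
  · rw [hchars]; omega
  · exact htake
  · rw [hnm]; exact_mod_cast hlow
  · rw [hnm]
    have h2 : ((m:Int)) < (((q + 1) * 10 ^ j : Nat) : Int) := by exact_mod_cast hup
    calc ((m:Int)) < (((q + 1) * 10 ^ j : Nat) : Int) := h2
      _ = ((q:Int) + 1) * 10 ^ j := by push_cast; ring

theorem ipow10Loop_pow (k : Nat) : ipow10Loop (10 ^ k) = 1 := by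
  induction k with
  | zero => rw [ipow10Loop]; norm_num
  | succ k ih =>
    rw [ipow10Loop]
    have h9 : (9:Int) < 10 ^ (k+1) := by
      calc (9:Int) < 10 ^ 1 := by norm_num
        _ ≤ 10 ^ (k+1) := by apply pow_le_pow_right₀ <;> omega
    have hmod : PySem.Int.mod (10 ^ (k+1) : Int) 10 = 0 := by
      rw [PySem.Int.mod_eq_zero_iff_dvd]
      exact ⟨10 ^ k, by ring⟩
    have hdiv : PySem.Int.floordiv (10 ^ (k+1) : Int) 10 = 10 ^ k := by
      rw [PySem.Int.floordiv_eq_ediv_of_pos (by norm_num)]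
      rw [pow_succ]
      exact Int.mul_ediv_cancel _ (by norm_num)
    rw [dif_pos ⟨h9, hmod⟩, hdiv]
    exact ih

theorem ipow10Loop_val (N : Int) (h1 : 1 ≤ N) (h2 : ipow10Loop N = 1) : ∃ k : Nat, N = 10 ^ k := by
  generalize hM : N.toNat = M at *
  induction M using Nat.strong_induction_on generalizing N with
  | _ M ih =>
    rw [ipow10Loop] at h2
    by_cases hc : 9 < N ∧ PySem.Int.mod N 10 = 0
    · rw [dif_pos hc] at h2
      obtain ⟨h9, hm⟩ := hc
      rw [PySem.Int.mod_eq_zero_iff_dvd] at hm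
      obtain ⟨c, hcc⟩ := hm
      have hdv : PySem.Int.floordiv N 10 = c := by
        rw [PySem.Int.floordiv_eq_ediv_of_pos (by norm_num), hcc]
        exact Int.mul_ediv_cancel_left _ (by norm_num)
      rw [hdv] at h2
      obtain ⟨k, hk⟩ := ih c.toNat (by omega) c (by omega) h2 rfl
      exact ⟨k + 1, by rw [pow_succ]; omega⟩
    · rw [dif_neg hc] at h2
      exact ⟨0, by simpa using h2⟩

theorem growLoop_eq (mult t c : Int) (j : Nat) :
    ∀ (fuel : Nat), j ≤ fuel → t ≤ c * mult ^ j → (∀ i < j, c * mult ^ i < t) →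
    growLoop mult fuel t c = c * mult ^ j := by
  induction j generalizing c with
  | zero =>
    intro fuel _ h1 _
    simp only [pow_zero, mul_one] at h1 ⊢
    cases fuel with
    | zero => rfl
    | succ fuel => rw [growLoop, if_neg (by omega)]
  | succ j ih =>
    intro fuel hf h1 h2
    have hc : c < t := by have := h2 0 (by omega); simpa using this
    cases fuel with
    | zero => omega
    | succ fuel =>
      rw [growLoop, if_pos hc]
      rw [ih (c * mult) fuel (by omega) (by rw [mul_assoc, ← pow_succ']; exact h1)
        (by intro i hi; rw [mul_assoc, ← pow_succ']; exact h2 (i+1) (by omega))]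
      rw [mul_assoc, ← pow_succ']

theorem mem_iff_getD (L : List Int) (x : Int) (i : Int)
    (hmono : ∀ (a b : Nat) (ha : a < L.length) (hb : b < L.length), a ≤ b → L[a] ≤ L[b])
    (h0 : 0 ≤ i) (hlen : i < (L.length : Int))
    (hbelow : ∀ (j : Nat) (hj : j < L.length), (j:Int) < i → L[j] ≤ x)
    (habove : ∀ (j : Nat) (hj : j < L.length), i ≤ (j:Int) → x < L[j]) :
    (0 < i ∧ PySem.List.pyGetD L (i-1) 0 = x) ↔ x ∈ L := by
  constructor
  · rintro ⟨hpos, hgd⟩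
    rw [PySem.List.pyGetD_eq_getElem L 0 (by omega) (by omega)] at hgd
    exact hgd ▸ List.getElem_mem _
  · intro hmem
    obtain ⟨k, hk, hkx⟩ := List.getElem_of_mem hmem
    have hki : (k:Int) < i := by
      by_contra hcon
      have := habove k hk (by omega)
      omega
    have hipos : 0 < i := by omega
    refine ⟨hipos, ?_⟩
    rw [PySem.List.pyGetD_eq_getElem L 0 (by omega) (by omega)]
    have hrange : (i-1).toNat < L.length := by omega
    have h1 : L[(i-1).toNat] ≤ x := hbelow _ hrange (by omega)
    have h2 : L[k] ≤ L[(i-1).toNat] := hmono k _ hk hrange (by omega)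
    omega

theorem find?_eq_getElem (x : Int) : ∀ (L : List Int) (k : Nat) (hk : k < L.length),
    (∀ (j : Nat) (hj : j < L.length), j < k → L[j] ≤ x) → x < L[k] →
    L.find? (fun y => decide (x < y)) = some L[k] := by
  intro L
  induction L with
  | nil => intro k hk; simp at hk
  | cons z zs ih =>
    intro k hk hbelow habove
    cases k with
    | zero =>
      rw [List.find?_cons_of_pos (by simpa using habove)]
      simp
    | succ k =>
      have hz : z ≤ x := by simpa using hbelow 0 (by simp) (by omega)
      rw [List.find?_cons_of_neg (by simp; omega)]
      exact ih k (by simpa using hk)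
        (fun j hj hjk => by simpa using hbelow (j+1) (by simpa using hj) (by omega))
        (by simpa using habove)

theorem factorLoop_char (nn f : Int) :
    ∀ (L : List Int) (cur : Int), List.Pairwise (· < ·) L → (∃ y ∈ L, f < y) →
    factorLoop nn f L cur =
      if ((PySem.Int.mod nn f == 0) && is_power_of_10 (PySem.Int.floordiv nn f)) = true ∧ f ∈ L
      then f
      else (L.find? (fun y => decide (f < y))).getD 0 := by
  intro L
  induction L with
  | nil => intro cur _ hex; simp at hex
  | cons z zs ih =>
    intro cur hpw hex
    have hzs : ∀ y ∈ zs, z < y := fun y hy => (List.pairwise_cons.mp hpw).1 y hy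
    rw [factorLoop]
    by_cases hz : z = f
    · subst hz
      by_cases hC : ((PySem.Int.mod nn z == 0) && is_power_of_10 (PySem.Int.floordiv nn z)) = true
      · rw [if_pos (by simpa using hC)]
        rw [if_pos ⟨hC, by simp⟩]
      · rw [if_neg (by simpa using hC), if_neg (by omega)]
        have hnotmem : z ∉ zs := fun hmem => absurd (hzs z hmem) (by omega)
        obtain ⟨y, hy, hylt⟩ := hex
        have hyzs : y ∈ zs := by
          rcases List.mem_cons.mp hy with h | h
          · omega
          · exact h
        rw [ih z (List.pairwise_cons.mp hpw).2 ⟨y, hyzs, hylt⟩]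
        rw [if_neg (by rintro ⟨hC', _⟩; exact hC hC'),
          if_neg (by rintro ⟨hC', _⟩; exact hC hC')]
        rw [List.find?_cons_of_neg (by simp)]
    · have hfirst : (z == f && (PySem.Int.mod nn z == 0) &&
          is_power_of_10 (PySem.Int.floordiv nn z)) = false := by
        simp [hz]
      rw [hfirst]
      simp only [Bool.false_eq_true, if_false]
      by_cases hlt : f < z
      · rw [if_pos hlt]
        have hnm : f ∉ z :: zs := by
          intro hmem
          rcases List.mem_cons.mp hmem with h | h
          · omega
          · exact absurd (hzs f h) (by omega)
        rw [if_neg (by rintro ⟨_, hmem⟩; exact hnm hmem)]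
        rw [List.find?_cons_of_pos (by simpa using hlt)]
        rfl
      · rw [if_neg hlt]
        obtain ⟨y, hy, hylt⟩ := hex
        have hyzs : y ∈ zs := by
          rcases List.mem_cons.mp hy with h | h
          · omega
          · exact h
        rw [ih z (List.pairwise_cons.mp hpw).2 ⟨y, hyzs, hylt⟩]
        have hfzs : (f ∈ z :: zs) ↔ (f ∈ zs) := by
          constructor
          · intro hmem; rcases List.mem_cons.mp hmem with h | h
            · omega
            · exact h
          · exact fun h => List.mem_cons_of_mem _ h
        rw [List.find?_cons_of_neg (by simpa using hlt)]
        by_cases hC : ((PySem.Int.mod nn f == 0) && is_power_of_10 (PySem.Int.floordiv nn f)) = true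
        · by_cases hmem : f ∈ zs
          · rw [if_pos ⟨hC, hmem⟩, if_pos ⟨hC, hfzs.mpr hmem⟩]
          · rw [if_neg (by rintro ⟨_, hm⟩; exact hmem hm),
              if_neg (by rintro ⟨_, hm⟩; exact hmem (hfzs.mp hm))]
        · rw [if_neg (by rintro ⟨hC', _⟩; exact hC hC'),
            if_neg (by rintro ⟨hC', _⟩; exact hC hC')]

theorem bisectLoopB_spec (a : List Int) (x : Int)
    (hmono : ∀ (i k : Nat) (hi : i < a.length) (hk : k < a.length), i ≤ k → a[i] ≤ a[k]) :
    ∀ (M : Nat) (lo hi : Int), (hi - lo).toNat = M → 0 ≤ lo → lo ≤ hi → hi ≤ (a.length : Int) →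
    (∀ (j : Nat) (hj : j < a.length), (j:Int) < lo → a[j] ≤ x) →
    (∀ (j : Nat) (hj : j < a.length), hi ≤ (j:Int) → x < a[j]) →
    lo ≤ bisectLoopB a x lo hi ∧ bisectLoopB a x lo hi ≤ hi ∧
    (∀ (j : Nat) (hj : j < a.length), (j:Int) < bisectLoopB a x lo hi → a[j] ≤ x) ∧
    (∀ (j : Nat) (hj : j < a.length), bisectLoopB a x lo hi ≤ (j:Int) → x < a[j]) := by
  intro M
  induction M using Nat.strong_induction_on with
  | _ M ih =>
    intro lo hi hM h0 hlh hhl hinvlo hinvhi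
    rw [bisectLoopB]
    by_cases h : lo < hi
    · rw [dif_pos h]
      have hfd : PySem.Int.floordiv (lo + hi) 2 = (lo + hi) / 2 :=
        PySem.Int.floordiv_eq_ediv_of_pos (by norm_num)
      set mid := PySem.Int.floordiv (lo + hi) 2 with hmid
      have hb : lo ≤ mid ∧ mid < hi := by rw [hfd]; omega
      have hmlen : mid < (a.length : Int) := by omega
      have hget : PySem.List.pyGetD a mid 0 = a[mid.toNat]'(by omega) :=
        PySem.List.pyGetD_eq_getElem a 0 (by omega) hmlen
      by_cases hle : PySem.List.pyGetD a mid 0 ≤ x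
      · rw [if_pos hle]
        refine (ih (hi - (mid + 1)).toNat (by omega) (mid + 1) hi (by omega) (by omega)
          (by omega) hhl ?_ hinvhi).imp (by omega) (fun h => h)
        intro j hj hjlt
        have : a[j] ≤ a[mid.toNat]'(by omega) := hmono j mid.toNat hj (by omega) (by omega)
        rw [hget] at hle
        omega
      · rw [if_neg hle]
        have hxlt : x < a[mid.toNat]'(by omega) := by rw [hget] at hle; omega
        refine (ih (mid - lo).toNat (by omega) lo mid (by omega) h0 (by omega)
          (by omega) hinvlo ?_).imp (fun h => h) (fun h => ⟨by omega, h.2⟩)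
        intro j hj hjge
        have : a[mid.toNat]'(by omega) ≤ a[j] := hmono mid.toNat j (by omega) hj (by omega)
        omega
    · rw [dif_neg h]
      have : lo = hi := by omega
      exact ⟨le_refl _, by omega, fun j hj hjl => hinvlo j hj hjl,
        fun j hj hjg => hinvhi j hj (by omega)⟩

theorem cond_iff (n f : Int) (j : Nat) (hf : 1000 ≤ f) (hf2 : f ≤ 9999) (hj : 1 ≤ j)
    (hlo : f * 10 ^ j ≤ n) (hhi : n < (f + 1) * 10 ^ j) :
    ((PySem.Int.mod n f == 0) && is_power_of_10 (PySem.Int.floordiv n f)) = true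
      ↔ n = f * 10 ^ j := by
  have hfpos : (0:Int) < f := by omega
  have hppos : (0:Int) < 10 ^ j := by positivity
  constructor
  · intro h
    rw [Bool.and_eq_true] at h
    obtain ⟨hmod, hpow⟩ := h
    rw [beq_iff_eq, PySem.Int.mod_eq_zero_iff_dvd] at hmod
    obtain ⟨c, hc⟩ := hmod
    have hdv : PySem.Int.floordiv n f = c := by
      rw [PySem.Int.floordiv_eq_ediv_of_pos hfpos, hc]
      exact Int.mul_ediv_cancel_left _ (by omega)
    have hnpos : (0:Int) < n := by nlinarith
    have hcpos : (1:Int) ≤ c := by nlinarith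
    rw [hdv] at hpow
    unfold is_power_of_10 at hpow
    rw [beq_iff_eq] at hpow
    obtain ⟨k, hk⟩ := ipow10Loop_val c hcpos hpow
    subst hk hc
    have hjk : (10:Int) ^ j ≤ 10 ^ k := by
      nlinarith
    have hkj : (10:Int) ^ k < 10 ^ (j + 1) := by
      have h1 : f * 10 ^ k < (f + 1) * 10 ^ j := hhi
      have h2 : (f + 1) * 10 ^ j ≤ f * (10 * 10 ^ j) := by nlinarith
      have h3 : f * 10 ^ k < f * (10 * 10 ^ j) := lt_of_lt_of_le h1 h2
      have h4 : (10:Int) ^ k < 10 * 10 ^ j := by nlinarith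
      calc (10:Int) ^ k < 10 * 10 ^ j := h4
        _ = 10 ^ (j + 1) := by rw [pow_succ]; ring
    have hj_le_k : j ≤ k := by
      by_contra hcon
      have : k < j := by omega
      have : (10:Int) ^ k < 10 ^ j := by
        apply pow_lt_pow_right₀ (by norm_num) this
      omega
    have hk_le_j : k ≤ j := by
      by_contra hcon
      have : j + 1 ≤ k := by omega
      have : (10:Int) ^ (j+1) ≤ 10 ^ k := by
        apply pow_le_pow_right₀ (by norm_num) this
      omega
    have : j = k := by omega
    subst this
    ring
  · intro h
    rw [Bool.and_eq_true]
    constructor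
    · rw [beq_iff_eq, PySem.Int.mod_eq_zero_iff_dvd]
      exact ⟨10 ^ j, by omega⟩
    · have hdv : PySem.Int.floordiv n f = 10 ^ j := by
        rw [PySem.Int.floordiv_eq_ediv_of_pos hfpos, h]
        exact Int.mul_ediv_cancel_left _ (by omega)
      rw [hdv]
      unfold is_power_of_10
      rw [beq_iff_eq]
      exact ipow10Loop_pow j

set_option maxHeartbeats 1000000 in
theorem choose_N_eq (n : Int) : choose_N n = choose_N_alt n := by
  by_cases h0 : n < 10000
  · unfold choose_N choose_N_alt
    rw [if_pos h0, if_pos h0]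
  · have hn : (10000:Int) ≤ n := by omega
    obtain ⟨q, j, hq1, hq2, hj1, hlen, htake, hlo, hhi⟩ := digits_pkg n hn
    have hq1c : (1000:Int) ≤ (q:Int) := by exact_mod_cast hq1
    have hq2c : (q:Int) ≤ 9999 := by exact_mod_cast Nat.le_of_lt_succ (by omega : q < 10000)
    -- the first4 expression evaluates to q in both ports
    have hslice : PySem.Str.slice (PySem.Int.toStr n) none (some 4) =
        String.ofList (List.take 4 (PySem.Int.toChars n)) := by
      unfold PySem.Str.slice PySem.Chars.slice
      rw [PySem.Int.toList_toStr, PySem.List.slice_to _ (by norm_num : (0:Int) ≤ 4)]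
      rfl
    have hfirst : (PySem.Int.ofStr? (PySem.Str.slice (PySem.Int.toStr n) none (some 4))).getD 0
        = (q:Int) := by
      rw [hslice, PySem.Int.ofStr?_ofList, htake, parse_range q hq1 hq2]
      rfl
    -- the exponent expression in B evaluates to j
    have hplen : (PySem.Str.len (PySem.Int.toStr n) - 4).toNat = j := by
      rw [PySem.Str.len_eq, PySem.Int.toList_toStr, hlen]
      push_cast
      omega
    have hppos : (0:Int) < 10 ^ j := by positivity
    -- facts about the goodfactors literal
    have hpwG : List.Pairwise (· < ·) goodfactors := by decide
    have hmonoG : ∀ (a b : Nat) (ha : a < goodfactors.length) (hb : b < goodfactors.length),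
        a ≤ b → goodfactors[a] ≤ goodfactors[b] := by
      intro a b ha hb hab
      rcases Nat.lt_or_ge a b with hlt | hge
      · exact le_of_lt (List.pairwise_iff_getElem.mp hpwG a b ha hb hlt)
      · have : a = b := by omega
        subst this; exact le_refl _
    have hlenG : ((goodfactors.length : Nat) : Int) = 114 := by rfl
    -- the binary search of B
    have hspec := bisectLoopB_spec goodfactors (q:Int) hmonoG
      ((goodfactors.length : Int) - 0).toNat 0 (goodfactors.length : Int) rfl (le_refl 0)
      (by omega) (le_refl _)
      (by intro jj hjj hneg; exfalso; omega)
      (by intro jj hjj hge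
          exfalso
          have : (jj:Int) < (goodfactors.length : Int) := by exact_mod_cast hjj
          omega)
    set i := bisectLoopB goodfactors (q:Int) 0 (goodfactors.length : Int) with hidef
    obtain ⟨hi0, hiU, hbelow, habove⟩ := hspec
    have h120len : (113:Nat) < goodfactors.length := by decide
    have h120 : goodfactors[(113:Nat)]'h120len = 10000 := by rfl
    have hiltlen : i < (goodfactors.length : Int) := by
      by_contra hcon
      have hieq : i = (goodfactors.length : Int) := by omega
      have := hbelow 113 h120len (by rw [hieq, hlenG]; norm_num)
      rw [h120] at this
      omega
    have hitoNat : (i.toNat : Int) = i := by omega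
    have hitoNatlen : i.toNat < goodfactors.length := by omega
    have hgbelow : ∀ (jj : Nat) (hj : jj < goodfactors.length), jj < i.toNat →
        goodfactors[jj] ≤ (q:Int) := by
      intro jj hj hlt
      exact hbelow jj hj (by omega)
    have hmemiff := mem_iff_getD goodfactors (q:Int) i hmonoG hi0 hiltlen hbelow habove
    have hfind : goodfactors.find? (fun y => decide ((q:Int) < y)) =
        some (goodfactors[i.toNat]'hitoNatlen) :=
      find?_eq_getElem (q:Int) goodfactors i.toNat hitoNatlen hgbelow
        (habove i.toNat hitoNatlen (by omega))
    -- the scan of A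
    have hexG : ∃ y ∈ goodfactors, (q:Int) < y :=
      ⟨10000, by decide, by omega⟩
    have hfactor := factorLoop_char n (q:Int) goodfactors 0 hpwG hexG
    have hcond := cond_iff n (q:Int) j hq1c hq2c hj1 hlo hhi
    -- fuel is ample
    have h10jn : (10:Int) ^ j ≤ n := by nlinarith
    have hjfuel : j ≤ n.toNat := by
      have h1 : j < 10 ^ j := Nat.lt_pow_self (by norm_num)
      have h2 : ((10:Nat) ^ j : Int) = (10:Int) ^ j := by push_cast; ring
      omega
    by_cases hcase : n = (q:Int) * 10 ^ j ∧ (q:Int) ∈ goodfactors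
    · -- exact case: both return n
      obtain ⟨heq, hmem⟩ := hcase
      have hgrow : growLoop 10 n.toNat n (q:Int) = (q:Int) * 10 ^ j := by
        apply growLoop_eq 10 n (q:Int) j n.toNat hjfuel (by omega)
        intro ii hii
        have hpow : (10:Int) ^ ii < 10 ^ j := by
          apply pow_lt_pow_right₀ (by norm_num) hii
        nlinarith
      have hA : choose_N n = n := by
        unfold choose_N
        rw [if_neg h0]
        simp only [hfirst]
        have hctrue : ((PySem.Int.mod n (q:Int) == 0) &&
            is_power_of_10 (PySem.Int.floordiv n (q:Int))) = true ∧ (q:Int) ∈ goodfactors :=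
          ⟨hcond.mpr heq, hmem⟩
        rw [hfactor, if_pos hctrue, hgrow, if_pos (by omega)]
      have hB : choose_N_alt n = n := by
        unfold choose_N_alt bisect_right
        rw [if_neg h0]
        simp only [hfirst, hplen, ← hidef]
        have hbtrue : n = (q:Int) * 10 ^ j ∧ 0 < i ∧
            PySem.List.pyGetD goodfactors (i-1) 0 = (q:Int) :=
          ⟨heq, (hmemiff.mpr hmem).1, (hmemiff.mpr hmem).2⟩
        rw [if_pos hbtrue]
      rw [hA, hB]
    · -- non-exact case: both return min(two_N, new_N)
      have hCfalse : ¬ (((PySem.Int.mod n (q:Int) == 0) &&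
          is_power_of_10 (PySem.Int.floordiv n (q:Int))) = true ∧ (q:Int) ∈ goodfactors) := by
        rintro ⟨hC, hmem⟩
        exact hcase ⟨hcond.mp hC, hmem⟩
      have hBfalse : ¬ (n = (q:Int) * 10 ^ j ∧ 0 < i ∧
          PySem.List.pyGetD goodfactors (i-1) 0 = (q:Int)) := by
        rintro ⟨heq, hrest⟩
        exact hcase ⟨heq, hmemiff.mp hrest⟩
      set g := goodfactors[i.toNat]'hitoNatlen with hgdef
      have hqg : (q:Int) < g := habove i.toNat hitoNatlen (by omega)
      have hgle : g ≤ 10000 := by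
        have hmemg : g ∈ goodfactors := List.getElem_mem _
        exact (by decide : ∀ x ∈ goodfactors, x ≤ 10000) g hmemg
      have hgetDi : PySem.List.pyGetD goodfactors i 0 = g := by
        rw [PySem.List.pyGetD_eq_getElem goodfactors 0 hi0 hiltlen]
      -- A's ×10 loop computes g * 10^j
      obtain ⟨j', rfl⟩ : ∃ j', j = j' + 1 := ⟨j - 1, by omega⟩
      have hgrow : growLoop 10 n.toNat n g = g * 10 ^ (j' + 1) := by
        apply growLoop_eq 10 n g (j' + 1) n.toNat hjfuel
          (by nlinarith [pow_pos (by norm_num : (0:Int) < 10) (j' + 1)])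
        intro ii hii
        have hple : (10:Int) ^ ii ≤ 10 ^ j' := by
          apply pow_le_pow_right₀ (by norm_num) (by omega)
        have hstep1 : g * 10 ^ ii ≤ 10000 * 10 ^ j' := by
          nlinarith [pow_pos (by norm_num : (0:Int) < 10) ii]
        have hstep2 : (10000:Int) * 10 ^ j' = 1000 * 10 ^ (j' + 1) := by ring
        by_cases hq1000 : (1000:Int) < (q:Int)
        · have : (1000:Int) * 10 ^ (j' + 1) < (q:Int) * 10 ^ (j' + 1) := by nlinarith
          omega
        · have hqeq : (q:Int) = 1000 := by omega
          have hmem1000 : ((1000:Int)) ∈ goodfactors := by decide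
          have hneq : n ≠ (q:Int) * 10 ^ (j' + 1) := by
            intro hcontra
            exact hcase ⟨hcontra, hqeq ▸ hmem1000⟩
          have hqq : (1000:Int) * 10 ^ (j' + 1) = (q:Int) * 10 ^ (j' + 1) := by rw [hqeq]
          omega
      have hnltg : n < g * 10 ^ (j' + 1) := by
        nlinarith [pow_pos (by norm_num : (0:Int) < 10) (j' + 1)]
      -- the power-of-two loop versus bit_length
      have hn1 : n - 1 ≠ 0 := by omega
      obtain ⟨K, hK⟩ : ∃ K, PySem.Int.bitLength (n-1) = K + 1 := by
        have hz : PySem.Int.bitLength (n-1) ≠ 0 := by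
          intro hzero
          have h2 := PySem.Int.lt_two_pow_bitLength (n-1)
          rw [hzero, pow_zero] at h2
          omega
        exact ⟨PySem.Int.bitLength (n-1) - 1, by omega⟩
      have hup2 := PySem.Int.lt_two_pow_bitLength (n-1)
      have hlow2 := PySem.Int.two_pow_bitLength_le (n-1) hn1
      rw [hK] at hup2 hlow2
      simp only [Nat.add_sub_cancel] at hlow2
      have habs : ((n-1).natAbs : Int) = n - 1 := by omega
      have hup2i : n - 1 < (2:Int) ^ (K + 1) := by
        have h' : ((n-1).natAbs : Int) < ((2 ^ (K+1) : Nat) : Int) := by exact_mod_cast hup2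
        rw [habs] at h'
        calc n - 1 < (((2:Nat) ^ (K+1) : Nat) : Int) := h'
          _ = (2:Int) ^ (K + 1) := by push_cast; ring
      have hlow2i : (2:Int) ^ K ≤ n - 1 := by
        have h' : (((2:Nat) ^ K : Nat) : Int) ≤ ((n-1).natAbs : Int) := by exact_mod_cast hlow2
        rw [habs] at h'
        calc (2:Int) ^ K = (((2:Nat) ^ K : Nat) : Int) := by push_cast; ring
          _ ≤ n - 1 := h'
      have hKfuel : K ≤ n.toNat := by
        have h1 : K < 2 ^ K := Nat.lt_two_pow_self
        have h2 : ((2:Nat) ^ K : Int) = (2:Int) ^ K := by push_cast; ring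
        omega
      have hgrow2 : growLoop 2 n.toNat n 2 = 2 * 2 ^ K := by
        apply growLoop_eq 2 n 2 K n.toNat hKfuel
        · have : (2:Int) * 2 ^ K = 2 ^ (K + 1) := by ring
          omega
        · intro ii hii
          have hple : (2:Int) ^ (ii + 1) ≤ 2 ^ K := by
            apply pow_le_pow_right₀ (by norm_num) (by omega)
          have : (2:Int) * 2 ^ ii = 2 ^ (ii + 1) := by ring
          omega
      have hA : choose_N n = min (2 * 2 ^ K) (g * 10 ^ (j' + 1)) := by
        unfold choose_N
        rw [if_neg h0]
        simp only [hfirst]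
        rw [hfactor, if_neg hCfalse, hfind]
        simp only [Option.getD_some]
        rw [hgrow, if_neg (by omega), hgrow2]
      have hB : choose_N_alt n = min ((1:Int) <<< (K + 1)) (g * 10 ^ (j' + 1)) := by
        unfold choose_N_alt bisect_right
        rw [if_neg h0]
        simp only [hfirst, hplen, ← hidef]
        rw [if_neg hBfalse, hgetDi, hK]
      rw [hA, hB, Int.shiftLeft_eq]
      have : (1:Int) * 2 ^ (K + 1) = 2 * 2 ^ K := by ring
      rw [this]

-- ===== VERDICT (by name: the statement is the Claim_ definition above) =====
theorem choose_N_spec : Claim_equal_choose_N := by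
  intro n _hdom
  unfold Spec_choose_N
  exact choose_N_eq n
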